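-- pv_equiv track=rewrite | github.com/doxmx/dojo | katas/lcd/py/kata/__init__.py | number_to_lcd
-- ===== SOURCE A (Python) =====
-- encoding = [
--     [2, 5, 7],  # 0
--     [0, 1, 1],  # 1
--     [2, 3, 6],  # 2
--     [2, 3, 3],  # 3
--     [0, 7, 1],  # 4
--     [2, 6, 3],  # 5
--     [2, 6, 7],  # 6
--     [2, 1, 1],  # 7
--     [2, 7, 7],  # 8
--     [2, 7, 3],  # 9
-- ]
--
-- lcd = [
--     "   ",  # 0
--     "  |",  # 1
--     " _ ",  # 2
--     " _|",  # 3
--     "|  ",  # 4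
--     "| |",  # 5
--     "|_ ",  # 6
--     "|_|",  # 7
-- ]
--
-- def number_to_lcd(number):
--     result = []
--     digits = str(number)  # '18'
--
--     line_top = ""
--     line_mid = ""
--     line_bot = ""
--     for digit in digits:  # '1', '8'
--         enc = encoding[int(digit)]
--         line_top += lcd[enc[0]]  # '    _ '
--         line_mid += lcd[enc[1]]  # '  ||_|'
--         line_bot += lcd[enc[2]]  # '  ||_|'
--
--     return "\n".join([line_top, line_mid, line_bot])
-- ===== SOURCE B (Python) =====
-- encoding = [
--     [2, 5, 7],  # 0
--     [0, 1, 1],  # 1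
--     [2, 3, 6],  # 2
--     [2, 3, 3],  # 3
--     [0, 7, 1],  # 4
--     [2, 6, 3],  # 5
--     [2, 6, 7],  # 6
--     [2, 1, 1],  # 7
--     [2, 7, 7],  # 8
--     [2, 7, 3],  # 9
-- ]
--
-- lcd = [
--     "   ",  # 0
--     "  |",  # 1
--     " _ ",  # 2
--     " _|",  # 3
--     "|  ",  # 4
--     "| |",  # 5
--     "|_ ",  # 6
--     "|_|",  # 7
-- ]
--
-- def number_to_lcd(number):
--     digits = str(number)
--     return "\n".join(
--         "".join(lcd[encoding[int(d)][row]] for d in digits)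
--         for row in range(3)
--     )
-- ===== Notes on version B (the rewrite author's own statement) =====
-- stated objective: simpler
-- what changed: Instead of one pass over the digits threading three string accumulators, B builds each of the three display rows independently (one join-comprehension per row over the digit string) and joins the rows; no mutable accumulators remain.
import Mathlib
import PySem

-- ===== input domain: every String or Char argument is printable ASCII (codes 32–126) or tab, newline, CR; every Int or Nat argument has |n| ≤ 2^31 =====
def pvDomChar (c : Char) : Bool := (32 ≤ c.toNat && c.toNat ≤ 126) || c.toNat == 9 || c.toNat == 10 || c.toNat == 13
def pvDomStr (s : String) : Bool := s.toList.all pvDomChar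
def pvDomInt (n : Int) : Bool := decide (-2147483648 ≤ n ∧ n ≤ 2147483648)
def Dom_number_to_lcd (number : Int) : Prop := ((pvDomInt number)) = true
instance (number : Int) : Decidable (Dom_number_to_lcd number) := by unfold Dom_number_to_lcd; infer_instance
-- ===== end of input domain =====

-- B builds each of the three display rows independently (one per-row pass joined by
-- "\n") instead of A's single pass threading three string accumulators.

-- shared module-level tables (the Python constants `encoding` and `lcd`)
def pvEncoding : List (List Int) :=
  [[2, 5, 7], [0, 1, 1], [2, 3, 6], [2, 3, 3], [0, 7, 1],
   [2, 6, 3], [2, 6, 7], [2, 1, 1], [2, 7, 7], [2, 7, 3]]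

def pvLcd : List (List Char) :=
  ["   ".toList, "  |".toList, " _ ".toList, " _|".toList,
   "|  ".toList, "| |".toList, "|_ ".toList, "|_|".toList]

-- ===== PORT A =====
-- one fold over the digit characters threading the triple (line_top, line_mid, line_bot);
-- int(digit) is PySem.Int.ofChars?, indexing is pyGet? (.getD covers the never-raising cases under Pre_)
def number_to_lcd (number : Int) : String :=
  let digits := PySem.Int.toChars number
  let res := digits.foldl
    (fun (acc : List Char × List Char × List Char) digit =>
      let enc := (PySem.List.pyGet? pvEncoding ((PySem.Int.ofChars? [digit]).getD 0)).getD []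
      (acc.1 ++ (PySem.List.pyGet? pvLcd ((PySem.List.pyGet? enc 0).getD 0)).getD [],
       acc.2.1 ++ (PySem.List.pyGet? pvLcd ((PySem.List.pyGet? enc 1).getD 0)).getD [],
       acc.2.2 ++ (PySem.List.pyGet? pvLcd ((PySem.List.pyGet? enc 2).getD 0)).getD []))
    ([], [], [])
  String.ofList (PySem.Chars.join ['\n'] [res.1, res.2.1, res.2.2])

-- ===== PORT B =====
-- lcd[encoding[int(digit)][row]] (B evaluates this whole expression per digit, per row)
def pvSeg (row : Int) (digit : Char) : List Char :=
  (PySem.List.pyGet? pvLcd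
    ((PySem.List.pyGet?
        ((PySem.List.pyGet? pvEncoding ((PySem.Int.ofChars? [digit]).getD 0)).getD [])
        row).getD 0)).getD []

-- "\n".join("".join(lcd[encoding[int(d)][row]] for d in digits) for row in range(3))
def number_to_lcd_alt (number : Int) : String :=
  let digits := PySem.Int.toChars number
  String.ofList (PySem.Chars.join ['\n']
    ((PySem.List.pyRange 0 3 1).map (fun row => (digits.map (pvSeg row)).flatten)))

-- ===== PRECONDITION & SPEC =====
-- Pre_ excludes negative numbers: there str(number) starts with '-' and int('-') raises ValueError in A (and in B).
def Pre_number_to_lcd (number : Int) : Prop := 0 ≤ number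
instance (number : Int) : Decidable (Pre_number_to_lcd number) := by unfold Pre_number_to_lcd; infer_instance
def pvWitness_number_to_lcd : Int := 518

def Spec_number_to_lcd (number : Int) (out : String) : Prop := out = number_to_lcd_alt number
instance (number : Int) (out : String) : Decidable (Spec_number_to_lcd number out) := by unfold Spec_number_to_lcd; infer_instance

-- ===== CLAIM (what is proved, stated in full; the proofs are below) =====
def Claim_equal_number_to_lcd : Prop := ∀ (number : Int), Dom_number_to_lcd number → Pre_number_to_lcd number → Spec_number_to_lcd number (number_to_lcd number)

-- ===== LEMMAS AND PROOFS =====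

-- A's fold, started from any three accumulators, appends per-row segments digit by digit
lemma pv_foldA (ds : List Char) (a b c : List Char) :
    ds.foldl
      (fun (acc : List Char × List Char × List Char) digit =>
        let enc := (PySem.List.pyGet? pvEncoding ((PySem.Int.ofChars? [digit]).getD 0)).getD []
        (acc.1 ++ (PySem.List.pyGet? pvLcd ((PySem.List.pyGet? enc 0).getD 0)).getD [],
         acc.2.1 ++ (PySem.List.pyGet? pvLcd ((PySem.List.pyGet? enc 1).getD 0)).getD [],
         acc.2.2 ++ (PySem.List.pyGet? pvLcd ((PySem.List.pyGet? enc 2).getD 0)).getD []))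
      (a, b, c)
    = (a ++ (ds.map (pvSeg 0)).flatten,
       b ++ (ds.map (pvSeg 1)).flatten,
       c ++ (ds.map (pvSeg 2)).flatten) := by
  induction ds generalizing a b c with
  | nil => simp
  | cons d ds ih =>
      simp only [List.foldl_cons, ih, List.map_cons, List.flatten_cons]
      simp [pvSeg, List.append_assoc]

theorem number_to_lcd_spec : Claim_equal_number_to_lcd := by
  intro number _ _
  show number_to_lcd number = number_to_lcd_alt number
  simp only [number_to_lcd, number_to_lcd_alt, pv_foldA]
  have h3 : PySem.List.pyRange 0 3 1 = [0, 1, 2] := by decide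
  simp [h3]

-- ===== VERDICT (by name: the statement is the Claim_ definition above) =====
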